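-- pv_equiv track=rewrite | github.com/YangXiaoo/Lookoop | AlgorithmsPractice/algorithmsPractice-3.py | crashGame2
-- ===== SOURCE A (Python) =====
-- def crashGameHandler(block):
--     if len(block) < 2:      # 特殊判断
--         return block
--     stack = []
--     for b in block:
--         stack.append(b)
--         if b < 0:
--             while len(stack) > 1:
--                 if stack[-2] < 0:                       # 倒数第二个为负数，退出循环
--                     break
--                 else:                                   # 最后一个为负数，倒数第二个为正数
--                     blockSum = stack[-1] + stack[-2]
--                     if blockSum < 0:                    # 正数被抵消
--                         stack.pop(len(stack) - 2)
--                     elif blockSum > 0:                  # 负数被抵消, 直接退出循环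
--                         stack.pop()
--                         break
--                     elif blockSum == 0:                 # 最后两个数可以直接抵消，抵消后退出循环
--                         stack.pop()
--                         stack.pop()
--                         break
--
--     return stack
--
-- def crashGame2(block):
--     """考虑左右链接成环"""
--     handledBlock = crashGameHandler(block)
--     while True:
--         preLength = len(handledBlock)
--         if preLength < 2:
--             break
--         # 只有左边界块往左（负值），右边界块往右（正值）才会合并
--         if handledBlock[0] < 0 and handledBlock[-1] > 0:
--             blockSum = handledBlock[0] + handledBlock[-1]
--             if  blockSum == 0:                  # 左右抵消
--                 handledBlock.pop(0)
--                 handledBlock.pop()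
--             elif blockSum > 0:                  # 负值被抵消
--                 handledBlock.pop(0)
--             else:                               # 正值被抵消
--                 handledBlock.pop()
--
--         if preLength == len(handledBlock): break
--
--     return [handledBlock, None][len(handledBlock) == 0]
-- ===== SOURCE B (Python) =====
-- def crashGame2(block):
--     # O(n) stack collision (pop only from the end) + two-pointer ring merge
--     stack = []
--     for b in block:
--         if b >= 0:
--             stack.append(b)
--             continue
--         alive = True
--         while stack and stack[-1] >= 0:
--             s = stack[-1] + b
--             if s < 0:
--                 stack.pop()
--             elif s > 0:
--                 alive = False
--                 break
--             else:
--                 stack.pop()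
--                 alive = False
--                 break
--         if alive:
--             stack.append(b)
--     i, j = 0, len(stack) - 1
--     while i < j and stack[i] < 0 and stack[j] > 0:
--         s = stack[i] + stack[j]
--         if s == 0:
--             i += 1
--             j -= 1
--         elif s > 0:
--             i += 1
--         else:
--             j -= 1
--     res = stack[i:j+1]
--     return res if res else None
-- ===== Notes on version B (the rewrite author's own statement) =====
-- stated objective: alternative
-- what changed: Replaces A's collision loop that deletes the second-to-last element with list.pop(index) and A's ring loop using pop(0) by a standard pop-from-the-end stack collision plus a two-pointer ring merge over indices, with no special case for short inputs.
import Mathlib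
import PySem

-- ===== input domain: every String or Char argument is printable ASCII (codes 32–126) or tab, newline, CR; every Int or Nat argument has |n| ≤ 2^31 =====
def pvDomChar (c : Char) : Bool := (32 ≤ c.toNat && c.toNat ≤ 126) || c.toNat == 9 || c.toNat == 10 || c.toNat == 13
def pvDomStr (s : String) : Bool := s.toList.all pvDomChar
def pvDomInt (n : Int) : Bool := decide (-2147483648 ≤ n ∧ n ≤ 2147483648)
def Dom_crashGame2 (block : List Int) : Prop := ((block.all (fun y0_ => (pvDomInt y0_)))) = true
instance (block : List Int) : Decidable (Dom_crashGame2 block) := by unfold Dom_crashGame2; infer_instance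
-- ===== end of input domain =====

-- B replaces A's pop(index)-based collision loop and pop(0) ring loop by a standard
-- pop-from-the-end stack collision plus a two-pointer ring merge (objective: alternative).


-- ===== PORT A =====
-- The Python 'stack' list is modeled with its TOP at the HEAD (reversed); it is
-- reversed back at the end of the for-loop.  collideA is A's inner 'while len(stack) > 1'
-- loop, entered just after 'stack.append(b)' (so the head is the freshly appended b):
--   stack[-1] = b (head), stack[-2] = t (second element);
--   'stack.pop(len(stack)-2)' removes t, 'stack.pop()' removes b.
def collideA : List Int → List Int
  | b :: t :: rest =>
    if t < 0 then b :: t :: rest                    -- stack[-2] < 0: break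
    else
      let blockSum := b + t
      if blockSum < 0 then collideA (b :: rest)     -- pop(len-2), loop again
      else if blockSum > 0 then t :: rest           -- pop(), break
      else rest                                     -- pop(); pop(); break
  | st => st                                        -- len(stack) <= 1: loop exits
termination_by st => st.length

def crashGameHandler (block : List Int) : List Int :=
  if block.length < 2 then block
  else
    (block.foldl (fun stack b =>
      if b < 0 then collideA (b :: stack) else b :: stack) []).reverse

-- A's 'while True' ring loop: each iteration performs at most one boundary merge and
-- breaks when the length did not change (or length < 2).  handledBlock.pop(0) = drop
-- the head, handledBlock.pop() = dropLast.
def ringA : List Int → List Int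
  | [] => []
  | [x] => [x]
  | a :: b :: rest =>
    let l := (a :: b :: rest).getLast (by simp)
    if a < 0 ∧ l > 0 then
      let blockSum := a + l
      if blockSum = 0 then ringA ((b :: rest).dropLast)        -- pop(0); pop()
      else if blockSum > 0 then ringA (b :: rest)              -- pop(0)
      else ringA ((a :: b :: rest).dropLast)                   -- pop()
    else a :: b :: rest                                        -- no change: break
termination_by st => st.length
decreasing_by all_goals (simp [List.length_dropLast]; try omega)

def crashGame2 (block : List Int) : Option (List Int) :=
  let handledBlock := ringA (crashGameHandler block)
  if handledBlock.length = 0 then none else some handledBlock  -- [handledBlock, None][len==0]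

-- ===== PORT B =====
-- The Python 'stack' is again modeled top-at-head (reversed), reversed back after the loop.
-- collideB is B's 'while stack and stack[-1] >= 0' loop for a negative b; it returns the
-- remaining stack together with the final value of 'alive'.
def collideB (b : Int) : List Int → List Int × Bool
  | [] => ([], true)
  | t :: rest =>
    if t ≥ 0 then
      let s := t + b
      if s < 0 then collideB b rest                 -- stack.pop(), loop again
      else if s > 0 then (t :: rest, false)         -- alive = False; break
      else (rest, false)                            -- pop(); alive = False; break
    else (t :: rest, true)                          -- stack[-1] < 0: loop exits
termination_by st => st.length

-- B's two-pointer ring merge on stack[i:j+1]: 'i += 1' = drop the head,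
-- 'j -= 1' = dropLast; the loop runs while i < j (length ≥ 2) and the guard holds.
def ringB : List Int → List Int
  | [] => []
  | a :: rest =>
    if h : rest = [] then [a]                       -- i = j: loop exits
    else
      let l := rest.getLast h
      if a < 0 ∧ l > 0 then
        let s := a + l
        if s = 0 then ringB rest.dropLast           -- i += 1; j -= 1
        else if s > 0 then ringB rest               -- i += 1
        else ringB (a :: rest.dropLast)             -- j -= 1
      else a :: rest
termination_by st => st.length
decreasing_by all_goals
  (simp [List.length_dropLast]
   try (have hne := List.length_pos_of_ne_nil h; omega))

def crashGame2_alt (block : List Int) : Option (List Int) :=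
  let stack := (block.foldl (fun stack b =>
    if b ≥ 0 then b :: stack
    else
      let r := collideB b stack
      if r.2 then b :: r.1 else r.1) []).reverse
  let res := ringB stack
  if res = [] then none else some res               -- 'res if res else None'

-- ===== PRECONDITION & SPEC =====
def Spec_crashGame2 (block : List Int) (out : Option (List Int)) : Prop := out = crashGame2_alt block
instance (block : List Int) (out : Option (List Int)) : Decidable (Spec_crashGame2 block out) := by unfold Spec_crashGame2; infer_instance

-- ===== CLAIM (what is proved, stated in full; the proofs are below) =====
def Claim_equal_crashGame2 : Prop := ∀ (block : List Int), Dom_crashGame2 block → Spec_crashGame2 block (crashGame2 block)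

-- ===== LEMMAS AND PROOFS =====

-- A's collision loop on b::stack equals B's collision loop on stack (with the alive flag).
theorem collideA_eq_collideB (b : Int) (stack : List Int) :
    collideA (b :: stack) =
      (if (collideB b stack).2 then b :: (collideB b stack).1 else (collideB b stack).1) := by
  induction stack with
  | nil => simp [collideA, collideB]
  | cons t rest ih =>
    simp only [collideA, collideB]
    by_cases ht : t < 0
    · have : ¬ t ≥ 0 := by omega
      simp [ht, this]
    · have ht' : t ≥ 0 := by omega
      by_cases h1 : b + t < 0
      · have h1' : t + b < 0 := by omega
        simp [ht, ht', h1, h1', ih]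
      · by_cases h2 : b + t > 0
        · have h2' : t + b > 0 := by omega
          simp [ht, ht', h1, h2, show ¬ t + b < 0 by omega, h2']
        · simp [ht, ht', h1, h2, show ¬ t + b < 0 by omega, show ¬ t + b > 0 by omega]

-- The two fold steps coincide, hence the whole folds do.
theorem fold_eq (block : List Int) (init : List Int) :
    block.foldl (fun stack b => if b < 0 then collideA (b :: stack) else b :: stack) init =
    block.foldl (fun stack b =>
      if b ≥ 0 then b :: stack
      else
        let r := collideB b stack
        if r.2 then b :: r.1 else r.1) init := by
  induction block generalizing init with
  | nil => rfl
  | cons b bs ih =>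
    simp only [List.foldl_cons]
    by_cases hb : b < 0
    · rw [collideA_eq_collideB]
      simp [hb, show ¬ b ≥ 0 by omega, ih]
    · simp [hb, show b ≥ 0 by omega, ih]

-- The two ring loops coincide.
theorem ringA_eq_ringB (l : List Int) : ringA l = ringB l := by
  induction hn : l.length using Nat.strong_induction_on generalizing l with
  | _ n ih =>
    match l with
    | [] => simp [ringA, ringB]
    | [x] => simp [ringA, ringB]
    | a :: b :: rest =>
      rw [ringA, ringB]
      simp only [show (b :: rest : List Int) ≠ [] from by simp, dite_false]
      have hlast : (a :: b :: rest).getLast (by simp) = (b :: rest).getLast (by simp) := by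
        simp [List.getLast_cons]
      rw [hlast]
      by_cases hg : a < 0 ∧ (b :: rest).getLast (by simp) > 0
      · simp only [hg]
        by_cases h0 : a + (b :: rest).getLast (by simp) = 0
        · simp only [h0, if_true]
          exact ih _ (by subst hn; simp [List.length_dropLast]; try omega) _ rfl
        · simp only [h0, if_false]
          by_cases h1 : a + (b :: rest).getLast (by simp) > 0
          · simp only [h1, if_true]
            exact ih _ (by subst hn; simp; try omega) _ rfl
          · simp only [h1, if_false]
            have hd : (a :: b :: rest).dropLast = a :: (b :: rest).dropLast := by
              simp [List.dropLast_cons_of_ne_nil]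
            rw [hd]
            exact ih _ (by subst hn; simp [List.length_dropLast]; try omega) _ rfl
      · simp [hg]

-- For length < 2 the fold of B's step reproduces the list.
theorem short_fold (block : List Int) (h : block.length < 2) :
    (block.foldl (fun stack b =>
      if b ≥ 0 then b :: stack
      else
        let r := collideB b stack
        if r.2 then b :: r.1 else r.1) []).reverse = block := by
  match block with
  | [] => rfl
  | [x] =>
    by_cases hx : x ≥ 0
    · simp [hx]
    · simp [hx, collideB]
  | a :: b :: rest => simp at h

theorem crashGame2_eq (block : List Int) : crashGame2 block = crashGame2_alt block := by
  unfold crashGame2 crashGame2_alt crashGameHandler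
  by_cases h : block.length < 2
  · rw [if_pos h, short_fold block h, ringA_eq_ringB]
    simp [List.length_eq_zero_iff]
  · rw [if_neg h, fold_eq, ringA_eq_ringB]
    simp [List.length_eq_zero_iff]

-- ===== VERDICT (by name: the statement is the Claim_ definition above) =====
theorem crashGame2_spec : Claim_equal_crashGame2 := by
  intro block _
  unfold Spec_crashGame2
  exact crashGame2_eq block
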